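-- pv_equiv track=rewrite | github.com/maxnelso/algorithms_competitions | top_coder/SRM 696/Ropestring.py | makerope
-- ===== SOURCE A (Python) =====
-- def makerope(s):
--   even_ropes = []
--   odd_ropes = []
--   current_rope = 0
--   for c in s:
--     if c == "-":
--       current_rope += 1
--     else:
--       if current_rope > 0:
--         if current_rope % 2 == 0:
--           even_ropes.append(current_rope)
--         else:
--           odd_ropes.append(current_rope)
--       current_rope = 0
--   if current_rope > 0:
--     if current_rope % 2 == 0:
--       even_ropes.append(current_rope)
--     else:
--       odd_ropes.append(current_rope)
--   even_ropes.sort(reverse = True)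
--   odd_ropes.sort(reverse = True)
--   out = ""
--   for rope in even_ropes:
--     out += "-" * rope
--     out += "."
--   for rope in odd_ropes:
--     out += "-" * rope
--     out += "."
--   if len(out) > len(s):
--     return out[:len(out) - 1]
--   else:
--     return out + ("." * (len(s) - len(out)))
--   return ""
-- ===== SOURCE B (Python) =====
-- def makerope(s):
--     n = len(s)
--     counts = {}
--     run = 0
--     for c in s:
--         if c == "-":
--             run += 1
--         else:
--             if run > 0:
--                 counts[run] = counts.get(run, 0) + 1
--             run = 0
--     if run > 0:
--         counts[run] = counts.get(run, 0) + 1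
--     parts = []
--     for parity in (0, 1):
--         for length in range(n, 0, -1):
--             k = counts.get(length, 0)
--             if k > 0 and length % 2 == parity:
--                 parts.append(("-" * length + ".") * k)
--     out = "".join(parts)
--     if len(out) > n:
--         return out[:-1]
--     return out + "." * (n - len(out))
-- ===== Notes on version B (the rewrite author's own statement) =====
-- stated objective: alternative
-- what changed: Replaces A's two reverse sorts of the collected run lengths by a counting pass (a dict of run-length multiplicities) emitted in one descending scan over 1..len(s) per parity (counting sort).
import Mathlib
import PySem

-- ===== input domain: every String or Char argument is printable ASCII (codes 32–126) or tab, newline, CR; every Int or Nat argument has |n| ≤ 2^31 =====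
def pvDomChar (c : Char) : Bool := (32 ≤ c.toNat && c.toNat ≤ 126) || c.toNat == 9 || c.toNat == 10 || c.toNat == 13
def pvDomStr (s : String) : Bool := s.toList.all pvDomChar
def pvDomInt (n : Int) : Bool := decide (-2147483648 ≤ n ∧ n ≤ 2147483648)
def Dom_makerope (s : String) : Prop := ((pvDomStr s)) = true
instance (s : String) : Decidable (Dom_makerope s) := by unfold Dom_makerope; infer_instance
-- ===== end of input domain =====

-- B replaces A's two reverse sorts of the collected run lengths by a counting pass
-- (a dict of run-length multiplicities) emitted in one descending scan per parity
-- (counting sort); equivalence is proved for every printable-ASCII string.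

-- ===== PORT A =====
-- run-collection step: for c in s: if c == "-": current_rope += 1 else: (flush) …
def ropeStepA (st : List Nat × List Nat × Nat) (c : Char) : List Nat × List Nat × Nat :=
  if c = '-' then (st.1, st.2.1, st.2.2 + 1)
  else if 0 < st.2.2 then
    (if st.2.2 % 2 = 0 then (st.1 ++ [st.2.2], st.2.1, 0) else (st.1, st.2.1 ++ [st.2.2], 0))
  else (st.1, st.2.1, 0)

-- trailing flush: the 'if current_rope > 0' block after the loop
def ropeFlushA (st : List Nat × List Nat × Nat) : List Nat × List Nat :=
  if 0 < st.2.2 then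
    (if st.2.2 % 2 = 0 then (st.1 ++ [st.2.2], st.2.1) else (st.1, st.2.1 ++ [st.2.2]))
  else (st.1, st.2.1)

def makerope (s : String) : String :=
  let cs := s.toList
  let st := cs.foldl ropeStepA ([], [], 0)
  let p := ropeFlushA st
  let evenRopes := PySem.List.sorted p.1 (fun x => x) true   -- even_ropes.sort(reverse=True)
  let oddRopes := PySem.List.sorted p.2 (fun x => x) true    -- odd_ropes.sort(reverse=True)
  -- out += "-" * rope; out += "."
  let out1 := evenRopes.foldl (fun acc r => acc ++ (List.replicate r '-' ++ ['.'])) []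
  let out := oddRopes.foldl (fun acc r => acc ++ (List.replicate r '-' ++ ['.'])) out1
  if cs.length < out.length then String.ofList (out.take (out.length - 1))   -- out[:len(out)-1]
  else String.ofList (out ++ List.replicate (cs.length - out.length) '.')

-- ===== PORT B =====
-- counting step: if c == "-": run += 1 else: (if run: counts[run] = counts.get(run,0)+1) …
def ropeStepB (st : PySem.Dict Nat Nat × Nat) (c : Char) : PySem.Dict Nat Nat × Nat :=
  if c = '-' then (st.1, st.2 + 1)
  else (if 0 < st.2 then st.1.insert st.2 (st.1.getD st.2 0 + 1) else st.1, 0)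

def ropeFlushB (st : PySem.Dict Nat Nat × Nat) : PySem.Dict Nat Nat :=
  if 0 < st.2 then st.1.insert st.2 (st.1.getD st.2 0 + 1) else st.1

def makerope_alt (s : String) : String :=
  let cs := s.toList
  let n := cs.length
  let d := ropeFlushB (cs.foldl ropeStepB (PySem.Dict.empty, 0))
  -- for parity in (0, 1): for length in range(n, 0, -1): k = counts.get(length, 0); if k > 0 and length % 2 == parity: parts.append(("-"*length + ".") * k)
  let parts := ([0, 1] : List Nat).flatMap (fun parity =>
    ((List.range n).map (fun i => n - i)).flatMap (fun L =>
      if 0 < d.getD L 0 ∧ L % 2 = parity then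
        List.replicate (d.getD L 0) (List.replicate L '-' ++ ['.'])
      else []))
  let out := parts.flatten   -- "".join(parts)
  if n < out.length then String.ofList (out.take (out.length - 1))   -- out[:-1]
  else String.ofList (out ++ List.replicate (n - out.length) '.')

-- ===== PRECONDITION & SPEC =====
def Spec_makerope (s : String) (out : String) : Prop := out = makerope_alt s
instance (s : String) (out : String) : Decidable (Spec_makerope s out) := by unfold Spec_makerope; infer_instance

-- ===== CLAIM (what is proved, stated in full; the proofs are below) =====
def Claim_equal_makerope : Prop := ∀ (s : String), Dom_makerope s → Spec_makerope s (makerope s)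

-- ===== LEMMAS AND PROOFS =====
-- the correspondence carried through the character loop
def pvInv (ev od : List Nat) (cur : Nat) (d : PySem.Dict Nat Nat) (m : Nat) : Prop :=
  (∀ L, d.getD L 0 = ev.count L + od.count L) ∧
  (∀ x ∈ ev, 0 < x ∧ x % 2 = 0 ∧ x ≤ m) ∧
  (∀ x ∈ od, 0 < x ∧ x % 2 = 1 ∧ x ≤ m) ∧ cur ≤ m

theorem pvInv_mono {ev od : List Nat} {cur : Nat} {d : PySem.Dict Nat Nat} {m m' : Nat}
    (h : pvInv ev od cur d m) (hm : m ≤ m') : pvInv ev od cur d m' := by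
  obtain ⟨h1, h2, h3, h4⟩ := h
  exact ⟨h1, fun x hx => ⟨(h2 x hx).1, (h2 x hx).2.1, le_trans (h2 x hx).2.2 hm⟩,
         fun x hx => ⟨(h3 x hx).1, (h3 x hx).2.1, le_trans (h3 x hx).2.2 hm⟩, le_trans h4 hm⟩

-- one flush (the non-'-' branch of the loop and the trailing flush share this shape)
theorem pv_flush_inv {ev od : List Nat} {cur : Nat} {d : PySem.Dict Nat Nat} {m : Nat}
    (h : pvInv ev od cur d m) :
    pvInv (if 0 < cur then (if cur % 2 = 0 then ev ++ [cur] else ev) else ev)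
          (if 0 < cur then (if cur % 2 = 0 then od else od ++ [cur]) else od)
          0 (if 0 < cur then d.insert cur (d.getD cur 0 + 1) else d) m := by
  obtain ⟨h1, h2, h3, h4⟩ := h
  by_cases hc : 0 < cur
  · simp only [if_pos hc]
    by_cases hp : cur % 2 = 0
    · simp only [if_pos hp]
      refine ⟨fun L => ?_, fun x hx => ?_, h3, Nat.zero_le _⟩
      · rcases eq_or_ne L cur with he | he
        · subst he
          rw [PySem.Dict.getD_insert, if_pos rfl, List.count_append, h1]
          have h5 : List.count L [L] = 1 := by simp
          omega
        · rw [PySem.Dict.getD_insert, if_neg he, List.count_append, h1]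
          have h5 : List.count L [cur] = 0 := List.count_eq_zero.2 (by simp [he])
          omega
      · rcases List.mem_append.1 hx with hx | hx
        · exact h2 x hx
        · simp only [List.mem_singleton] at hx; subst hx; exact ⟨hc, hp, h4⟩
    · simp only [if_neg hp]
      refine ⟨fun L => ?_, h2, fun x hx => ?_, Nat.zero_le _⟩
      · rcases eq_or_ne L cur with he | he
        · subst he
          rw [PySem.Dict.getD_insert, if_pos rfl, List.count_append, h1]
          have h5 : List.count L [L] = 1 := by simp
          omega
        · rw [PySem.Dict.getD_insert, if_neg he, List.count_append, h1]
          have h5 : List.count L [cur] = 0 := List.count_eq_zero.2 (by simp [he])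
          omega
      · rcases List.mem_append.1 hx with hx | hx
        · exact h3 x hx
        · simp only [List.mem_singleton] at hx; subst hx; exact ⟨hc, by omega, h4⟩
  · simp only [if_neg hc]
    exact ⟨h1, h2, h3, Nat.zero_le _⟩

theorem pv_loop_corr (t : List Char) : ∀ (ev od : List Nat) (cur : Nat)
    (d : PySem.Dict Nat Nat) (m : Nat), pvInv ev od cur d m →
    (t.foldl ropeStepB (d, cur)).2 = (t.foldl ropeStepA (ev, od, cur)).2.2 ∧
    pvInv (t.foldl ropeStepA (ev, od, cur)).1 (t.foldl ropeStepA (ev, od, cur)).2.1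
          (t.foldl ropeStepA (ev, od, cur)).2.2 (t.foldl ropeStepB (d, cur)).1
          (m + t.length) := by
  induction t with
  | nil =>
    intro ev od cur d m h
    exact ⟨by simp, by simpa using h⟩
  | cons c t ih =>
    intro ev od cur d m h
    simp only [List.foldl_cons, List.length_cons]
    by_cases hc : c = '-'
    · have hA : ropeStepA (ev, od, cur) c = (ev, od, cur + 1) := by simp [ropeStepA, hc]
      have hB : ropeStepB (d, cur) c = (d, cur + 1) := by simp [ropeStepB, hc]
      rw [hA, hB]
      have h' : pvInv ev od (cur + 1) d (m + 1) :=
        ⟨h.1, fun x hx => ⟨(h.2.1 x hx).1, (h.2.1 x hx).2.1, Nat.le_succ_of_le (h.2.1 x hx).2.2⟩,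
         fun x hx => ⟨(h.2.2.1 x hx).1, (h.2.2.1 x hx).2.1, Nat.le_succ_of_le (h.2.2.1 x hx).2.2⟩,
         Nat.succ_le_succ h.2.2.2⟩
      obtain ⟨e1, e2⟩ := ih ev od (cur + 1) d (m + 1) h'
      refine ⟨e1, ?_⟩
      have hm : m + 1 + t.length = m + (t.length + 1) := by omega
      exact hm ▸ e2
    · have hA : ropeStepA (ev, od, cur) c =
          ((if 0 < cur then (if cur % 2 = 0 then ev ++ [cur] else ev) else ev),
           (if 0 < cur then (if cur % 2 = 0 then od else od ++ [cur]) else od), 0) := by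
        simp only [ropeStepA, if_neg hc]
        split_ifs <;> rfl
      have hB : ropeStepB (d, cur) c =
          ((if 0 < cur then d.insert cur (d.getD cur 0 + 1) else d), 0) := by
        simp [ropeStepB, hc]
      rw [hA, hB]
      obtain ⟨e1, e2⟩ := ih _ _ 0 _ m (pv_flush_inv h)
      exact ⟨e1, pvInv_mono e2 (by omega)⟩

-- descending length list [n, n-1, …, 1] used by B's emission scan
theorem pv_mem_descLens (n x : Nat) :
    x ∈ (List.range n).map (fun i => n - i) ↔ 1 ≤ x ∧ x ≤ n := by
  simp only [List.mem_map, List.mem_range]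
  constructor
  · rintro ⟨i, hi, rfl⟩; omega
  · rintro ⟨h1, h2⟩; exact ⟨n - x, by omega, by omega⟩

theorem pv_pairwise_descLens (n : Nat) :
    ((List.range n).map (fun i => n - i)).Pairwise (· > ·) := by
  refine (List.pairwise_map).2 ?_
  refine List.Pairwise.imp_of_mem ?_ (List.pairwise_lt_range (n := n))
  intro a b ha hb hab
  simp only [List.mem_range] at ha hb
  omega

theorem pv_nodup_descLens (n : Nat) : ((List.range n).map (fun i => n - i)).Nodup :=
  (pv_pairwise_descLens n).imp (fun h => by omega)

-- counting-sort core: emitting each length its multiplicity many times, over a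
-- strictly-descending nodup list of candidate lengths, is Python's reverse sort
theorem pv_count_flatMap_replicate (ds : List Nat) (hnd : ds.Nodup) (k : Nat → Nat) (a : Nat) :
    (ds.flatMap (fun L => List.replicate (k L) L)).count a = if a ∈ ds then k a else 0 := by
  induction ds with
  | nil => simp
  | cons d ds ih =>
    simp only [List.flatMap_cons, List.count_append, List.count_replicate,
      ih (List.nodup_cons.1 hnd).2, List.mem_cons]
    have hd : d ∉ ds := (List.nodup_cons.1 hnd).1
    by_cases hda : a = d
    · subst hda; simp [hd]
    · simp [hda, Ne.symm hda]

theorem pv_pairwise_flatMap_replicate (ds : List Nat) (h : ds.Pairwise (· > ·)) (k : Nat → Nat) :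
    (ds.flatMap (fun L => List.replicate (k L) L)).Pairwise (· ≥ ·) := by
  induction ds with
  | nil => simp
  | cons d ds ih =>
    simp only [List.flatMap_cons]
    rw [List.pairwise_append]
    refine ⟨List.pairwise_replicate.2 (Or.inr le_rfl), ih (List.pairwise_cons.1 h).2, ?_⟩
    intro a ha b hb
    have ha' : a = d := List.eq_of_mem_replicate ha
    subst ha'
    obtain ⟨L, hL, hbL⟩ := List.mem_flatMap.1 hb
    have hb' : b = L := List.eq_of_mem_replicate hbL
    exact hb' ▸ le_of_lt ((List.pairwise_cons.1 h).1 L hL)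

theorem pv_counting_eq_sorted (n : Nat) (xs : List Nat) (hx : ∀ x ∈ xs, 1 ≤ x ∧ x ≤ n) :
    ((List.range n).map (fun i => n - i)).flatMap (fun L => List.replicate (xs.count L) L) =
      PySem.List.sorted xs (fun x => x) true := by
  have hperm : (((List.range n).map (fun i => n - i)).flatMap
      (fun L => List.replicate (xs.count L) L)).Perm (PySem.List.sorted xs (fun x => x) true) := by
    refine (List.perm_iff_count.2 fun a => ?_).trans
      (PySem.List.sorted_perm (xs := xs) (key := fun x : Nat => x) (rev := true)).symm
    rw [pv_count_flatMap_replicate _ (pv_nodup_descLens n)]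
    by_cases ha : a ∈ (List.range n).map (fun i => n - i)
    · simp [ha]
    · rw [if_neg ha, eq_comm, List.count_eq_zero]
      intro hmem
      exact ha ((pv_mem_descLens n a).2 (hx a hmem))
  refine hperm.eq_of_pairwise (fun a b _ _ h1 h2 => le_antisymm h2 h1) ?_ ?_
  · exact pv_pairwise_flatMap_replicate _ (pv_pairwise_descLens n) _
  · exact PySem.List.sorted_pairwise_rev (xs := xs) (key := fun x : Nat => x)

-- one parity lane of B's emission = the pieces of one reverse-sorted list of A
theorem pv_emit_parity (n : Nat) (d : PySem.Dict Nat Nat) (xs ys : List Nat) (par : Nat)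
    (hcnt : ∀ L, d.getD L 0 = xs.count L + ys.count L)
    (hxs : ∀ x ∈ xs, 0 < x ∧ x % 2 = par ∧ x ≤ n)
    (hys : ∀ x ∈ ys, x % 2 ≠ par) :
    (((List.range n).map (fun i => n - i)).flatMap (fun L =>
        if 0 < d.getD L 0 ∧ L % 2 = par then
          List.replicate (d.getD L 0) (List.replicate L '-' ++ ['.'])
        else [])).flatten =
      (PySem.List.sorted xs (fun x => x) true).flatMap
        (fun r => List.replicate r '-' ++ ['.']) := by
  have hstep : ∀ L ∈ (List.range n).map (fun i => n - i),
      (if 0 < d.getD L 0 ∧ L % 2 = par then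
        List.replicate (d.getD L 0) (List.replicate L '-' ++ ['.'])
      else []) = List.replicate (xs.count L) (List.replicate L '-' ++ ['.']) := by
    intro L _
    by_cases hif : 0 < d.getD L 0 ∧ L % 2 = par
    · rw [if_pos hif]
      have hy : ys.count L = 0 := List.count_eq_zero.2 fun hm => hys L hm hif.2
      rw [hcnt L, hy, Nat.add_zero]
    · rw [if_neg hif]
      rw [not_and_or] at hif
      rcases hif with hif | hif
      · have : xs.count L = 0 := by
          have := hcnt L; omega
        rw [this]; rfl
      · have : xs.count L = 0 := List.count_eq_zero.2 fun hm => hif (hxs L hm).2.1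
        rw [this]; rfl
  rw [List.flatMap_congr hstep]
  have hflat : (((List.range n).map (fun i => n - i)).flatMap (fun L =>
      List.replicate (xs.count L) (List.replicate L '-' ++ ['.']))).flatten =
      ((List.range n).map (fun i => n - i)).flatMap (fun L =>
        (List.replicate (xs.count L) L).flatMap (fun r => List.replicate r '-' ++ ['.'])) := by
    generalize (List.range n).map (fun i => n - i) = ds
    induction ds with
    | nil => rfl
    | cons a t ih =>
      simp only [List.flatMap_cons, List.flatten_append, ih]
      congr 1
      simp [List.flatMap_def, List.map_replicate]
  rw [hflat, ← List.flatMap_assoc,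
    pv_counting_eq_sorted n xs (fun x hx => ⟨(hxs x hx).1, (hxs x hx).2.2⟩)]

-- ===== VERDICT (by name: the statement is the Claim_ definition above) =====
theorem makerope_spec : Claim_equal_makerope := by
  intro s _
  show makerope s = makerope_alt s
  have hinv0 : pvInv [] [] 0 PySem.Dict.empty 0 := by
    refine ⟨fun L => by simp [PySem.Dict.getD_empty], ?_, ?_, le_rfl⟩ <;> simp
  obtain ⟨hrun, hinv⟩ := pv_loop_corr s.toList [] [] 0 PySem.Dict.empty 0 hinv0
  rw [Nat.zero_add] at hinv
  simp only [makerope, makerope_alt]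
  set cs := s.toList with hcs
  set stA := List.foldl ropeStepA ([], [], 0) cs with hstA
  set stB := List.foldl ropeStepB (PySem.Dict.empty, 0) cs with hstB
  set pA := ropeFlushA stA with hpA
  set dd := ropeFlushB stB with hdd
  have hAflush : pA = ((if 0 < stA.2.2 then (if stA.2.2 % 2 = 0 then stA.1 ++ [stA.2.2] else stA.1) else stA.1),
      (if 0 < stA.2.2 then (if stA.2.2 % 2 = 0 then stA.2.1 else stA.2.1 ++ [stA.2.2]) else stA.2.1)) := by
    rw [hpA]; unfold ropeFlushA; split_ifs <;> rfl
  have hBflush : dd = (if 0 < stA.2.2 then stB.1.insert stA.2.2 (stB.1.getD stA.2.2 0 + 1) else stB.1) := by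
    rw [hdd]; unfold ropeFlushB; rw [hrun]
  have hflush := pv_flush_inv (cur := stA.2.2) hinv
  rw [← hBflush] at hflush
  have e1 : (if 0 < stA.2.2 then (if stA.2.2 % 2 = 0 then stA.1 ++ [stA.2.2] else stA.1) else stA.1) = pA.1 := by
    rw [hAflush]
  have e2 : (if 0 < stA.2.2 then (if stA.2.2 % 2 = 0 then stA.2.1 else stA.2.1 ++ [stA.2.2]) else stA.2.1) = pA.2 := by
    rw [hAflush]
  rw [e1, e2] at hflush
  obtain ⟨hcnt, hev, hod, -⟩ := hflush
  have hemit0 := pv_emit_parity cs.length dd pA.1 pA.2 0 hcnt hev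
    (fun x hx => by have := (hod x hx).2.1; omega)
  have hemit1 := pv_emit_parity cs.length dd pA.2 pA.1 1
    (fun L => by rw [hcnt L]; omega) hod
    (fun x hx => by have := (hev x hx).2.1; omega)
  rw [PySem.List.foldl_append_eq_flatMap, PySem.List.foldl_append_eq_flatMap]
  simp only [List.nil_append, List.flatMap_cons, List.flatMap_nil, List.append_nil,
    List.flatten_append]
  rw [hemit0, hemit1]
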